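-- pv_equiv track=rewrite | github.com/austin-crumbles/minesniffer | ui/animate.py | snake_grid
-- ===== SOURCE A (Python) =====
-- def snake_grid(width, height):
--     ungridded = get_flat_grid(width, height)
--     current_cell = [0, 0]
--     possible_operations = ((0, 1), (1, 0), (0, -1), (-1, 0))
--     current_operation = possible_operations[0]
--
--     while len(ungridded) > 0:
--         row, col = current_cell
--         try:
--             if row < 0 or col < 0:
--                 raise IndexError
--             if (row, col) not in ungridded:
--                 raise IndexError
--             ungridded.remove((row, col))
--             yield row, col
--
--         except IndexError:
--             current_cell[0] -= current_operation[0]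
--             current_cell[1] -= current_operation[1]
--
--             next_op = possible_operations.index(current_operation) + 1
--             next_op = next_op if next_op < len(possible_operations) else 0
--             current_operation = possible_operations[next_op]
--
--         current_cell[0] += current_operation[0]
--         current_cell[1] += current_operation[1]
--
-- def get_flat_grid(width, height):
--     """
--     Returns a 1-dimensional list of all the cell coords in the grid.
--     """
--     grid = []
--     for row in range(width):
--         for col in range(height):
--             grid.append((row, col))
--
--     return grid
-- ===== SOURCE B (Python) =====
-- def snake_grid(width, height):
--     top, bottom, left, right = 0, width - 1, 0, height - 1
--     while top <= bottom and left <= right: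
--         for c in range(left, right + 1):
--             yield top, c
--         for r in range(top + 1, bottom + 1):
--             yield r, right
--         if top < bottom:
--             for c in range(right - 1, left - 1, -1):
--                 yield bottom, c
--         if left < right:
--             for r in range(bottom - 1, top, -1):
--                 yield r, left
--         top += 1; bottom -= 1; left += 1; right -= 1
-- ===== Notes on version B (the rewrite author's own statement) =====
-- stated objective: simpler
-- what changed: Replaced A's simulated walker (which scans a shrinking to-visit list and turns on IndexError/visited-cell exceptions) by a boundary-peeling spiral that keeps four shrinking bounds and emits each ring's top row, right column, bottom row and left column directly.
import Mathlib
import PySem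

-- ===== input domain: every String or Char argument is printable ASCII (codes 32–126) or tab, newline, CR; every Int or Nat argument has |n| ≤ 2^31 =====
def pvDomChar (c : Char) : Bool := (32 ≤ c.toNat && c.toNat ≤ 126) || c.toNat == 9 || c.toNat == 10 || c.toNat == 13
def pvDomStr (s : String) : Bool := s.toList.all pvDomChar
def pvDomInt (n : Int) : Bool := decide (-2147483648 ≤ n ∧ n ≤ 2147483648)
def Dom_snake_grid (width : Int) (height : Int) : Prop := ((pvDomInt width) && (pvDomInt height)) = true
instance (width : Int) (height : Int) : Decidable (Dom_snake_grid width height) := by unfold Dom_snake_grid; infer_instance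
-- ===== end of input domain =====

-- B replaces A's visited-set walker with a boundary-peeling spiral over four shrinking
-- bounds (objective: simpler; same clockwise order, proven equal for all inputs).

-- ===== PORT A =====
-- get_flat_grid: row-major list of all cells
def get_flat_grid (width : Int) (height : Int) : List (Int × Int) :=
  (PySem.List.pyRange 0 width 1).foldl
    (fun grid row =>
      (PySem.List.pyRange 0 height 1).foldl (fun g col => g ++ [(row, col)]) grid) []

-- possible_operations.index(op) + 1, wrapping: the successor in ((0,1),(1,0),(0,-1),(-1,0))
def nextOpA (op : Int × Int) : Int × Int :=
  if op = (0, 1) then (1, 0)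
  else if op = (1, 0) then (0, -1)
  else if op = (0, -1) then (-1, 0)
  else (0, 1)

-- the while-loop of A; fuel 5*len+5 is proven sufficient below (each iteration either
-- removes a cell or turns; at most 4 turns per spiral ring, each ring has ≥ 1 cell)
def loopA : Nat → List (Int × Int) → (Int × Int) → (Int × Int) → List (Int × Int) → List (Int × Int)
  | 0, _, _, _, acc => acc
  | fuel + 1, ung, cell, op, acc =>
    if 0 < ung.length then
      if cell.1 < 0 ∨ cell.2 < 0 ∨ cell ∉ ung then
        -- except IndexError: step back, turn clockwise, step forward
        let op' := nextOpA op
        loopA fuel ung (cell.1 - op.1 + op'.1, cell.2 - op.2 + op'.2) op' acc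
      else
        -- ungridded.remove((row, col)); yield row, col; step forward
        loopA fuel (ung.erase cell) (cell.1 + op.1, cell.2 + op.2) op (acc ++ [cell])
    else acc

def snake_grid (width : Int) (height : Int) : List (Int × Int) :=
  loopA (5 * (get_flat_grid width height).length + 5) (get_flat_grid width height) (0, 0) (0, 1) []

-- ===== PORT B =====
-- boundary peeling: yield top row, right column, bottom row (reversed), left column
-- (reversed), then recurse on the inner rectangle
def peelB (top bottom left right : Int) : List (Int × Int) :=
  if _h : top ≤ bottom ∧ left ≤ right then
    (PySem.List.pyRange left (right + 1) 1).map (fun c => (top, c))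
    ++ (PySem.List.pyRange (top + 1) (bottom + 1) 1).map (fun r => (r, right))
    ++ (if top < bottom then (PySem.List.pyRange (right - 1) (left - 1) (-1)).map (fun c => (bottom, c)) else [])
    ++ (if left < right then (PySem.List.pyRange (bottom - 1) top (-1)).map (fun r => (r, left)) else [])
    ++ peelB (top + 1) (bottom - 1) (left + 1) (right - 1)
  else []
termination_by (bottom + 1 - top).toNat
decreasing_by omega

def snake_grid_alt (width : Int) (height : Int) : List (Int × Int) :=
  peelB 0 (width - 1) 0 (height - 1)

-- ===== PRECONDITION & SPEC =====
def Spec_snake_grid (width : Int) (height : Int) (out : List (Int × Int)) : Prop := out = snake_grid_alt width height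
instance (width : Int) (height : Int) (out : List (Int × Int)) : Decidable (Spec_snake_grid width height out) := by unfold Spec_snake_grid; infer_instance

-- ===== CLAIM (what is proved, stated in full; the proofs are below) =====
def Claim_equal_snake_grid : Prop := ∀ (width : Int) (height : Int), Dom_snake_grid width height → Spec_snake_grid width height (snake_grid width height)

-- ===== LEMMAS AND PROOFS =====

-- canonical straight segments of a spiral ring (k cells)
def segT (t l : Int) (k : Nat) : List (Int × Int) := (List.range k).map (fun (i : Nat) => (t, l + (i : Int)))
def segR (t r : Int) (k : Nat) : List (Int × Int) := (List.range k).map (fun (i : Nat) => (t + 1 + (i : Int), r))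
def segB (b r : Int) (k : Nat) : List (Int × Int) := (List.range k).map (fun (i : Nat) => (b, r - 1 - (i : Int)))
def segL (b l : Int) (k : Nat) : List (Int × Int) := (List.range k).map (fun (i : Nat) => (b - 1 - (i : Int), l))

@[simp] lemma length_segT (t l : Int) (k : Nat) : (segT t l k).length = k := by simp [segT]
@[simp] lemma length_segR (t r : Int) (k : Nat) : (segR t r k).length = k := by simp [segR]
@[simp] lemma length_segB (b r : Int) (k : Nat) : (segB b r k).length = k := by simp [segB]
@[simp] lemma length_segL (b l : Int) (k : Nat) : (segL b l k).length = k := by simp [segL]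

lemma mem_segT (t l : Int) (k : Nat) (p : Int × Int) :
    p ∈ segT t l k ↔ p.1 = t ∧ l ≤ p.2 ∧ p.2 < l + k := by
  simp [segT, Prod.ext_iff]
  constructor
  · rintro ⟨i, hi, h1, h2⟩; omega
  · rintro ⟨h1, h2, h3⟩; exact ⟨(p.2 - l).toNat, by omega, by omega, by omega⟩

lemma mem_segR (t r : Int) (k : Nat) (p : Int × Int) :
    p ∈ segR t r k ↔ p.2 = r ∧ t + 1 ≤ p.1 ∧ p.1 < t + 1 + k := by
  simp [segR, Prod.ext_iff]
  constructor
  · rintro ⟨i, hi, h1, h2⟩; omega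
  · rintro ⟨h1, h2, h3⟩; exact ⟨(p.1 - t - 1).toNat, by omega, by omega, by omega⟩

lemma mem_segB (b r : Int) (k : Nat) (p : Int × Int) :
    p ∈ segB b r k ↔ p.1 = b ∧ r - k ≤ p.2 ∧ p.2 ≤ r - 1 := by
  simp [segB, Prod.ext_iff]
  constructor
  · rintro ⟨i, hi, h1, h2⟩; omega
  · rintro ⟨h1, h2, h3⟩; exact ⟨(r - 1 - p.2).toNat, by omega, by omega, by omega⟩

lemma mem_segL (b l : Int) (k : Nat) (p : Int × Int) :
    p ∈ segL b l k ↔ p.2 = l ∧ b - k ≤ p.1 ∧ p.1 ≤ b - 1 := by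
  simp [segL, Prod.ext_iff]
  constructor
  · rintro ⟨i, hi, h1, h2⟩; omega
  · rintro ⟨h1, h2, h3⟩; exact ⟨(b - 1 - p.1).toNat, by omega, by omega, by omega⟩

-- the four pyRange pieces of a peelB ring, as canonical segments
lemma pieceT (t l r : Int) :
    (PySem.List.pyRange l (r + 1) 1).map (fun c => (t, c)) = segT t l (r + 1 - l).toNat := by
  rw [PySem.List.pyRange_one, List.map_map]
  rfl

lemma pieceR (t b r : Int) :
    (PySem.List.pyRange (t + 1) (b + 1) 1).map (fun x => (x, r)) = segR t r (b - t).toNat := by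
  rw [PySem.List.pyRange_one, List.map_map,
    show (b + 1 - (t + 1)).toNat = (b - t).toNat from by omega]
  rfl

lemma pieceB (b l r : Int) :
    (PySem.List.pyRange (r - 1) (l - 1) (-1)).map (fun c => (b, c)) = segB b r (r - l).toNat := by
  rw [PySem.List.pyRange_neg_one, List.map_map,
    show (r - 1 - (l - 1)).toNat = (r - l).toNat from by omega]
  rfl

lemma pieceL (t b l : Int) :
    (PySem.List.pyRange (b - 1) t (-1)).map (fun x => (x, l)) = segL b l (b - 1 - t).toNat := by
  rw [PySem.List.pyRange_neg_one, List.map_map]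
  rfl

lemma peelB_eq_nil (t b l r : Int) (h : ¬(t ≤ b ∧ l ≤ r)) : peelB t b l r = [] := by
  rw [peelB]; simp [h]

-- peelB, one ring unfolded, in the three shapes a ring can take
lemma peelB_eq_row (t l r : Int) (hlr : l ≤ r) :
    peelB t t l r = segT t l (r + 1 - l).toNat := by
  rw [peelB]
  rw [dif_pos ⟨le_refl t, hlr⟩, pieceT]
  rw [PySem.List.pyRange_one_eq_nil (by omega), peelB_eq_nil _ _ _ _ (by omega)]
  have hL : PySem.List.pyRange (t - 1) t (-1) = [] := PySem.List.pyRange_neg_one_eq_nil (by omega)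
  simp [hL]

lemma peelB_eq_col (t b l : Int) (htb : t < b) :
    peelB t b l l = segT t l 1 ++ segR t l (b - t).toNat := by
  rw [peelB]
  rw [dif_pos ⟨by omega, le_refl l⟩, pieceT, pieceR, peelB_eq_nil _ _ _ _ (by omega),
    show (l + 1 - l).toNat = 1 from by omega]
  have hB : PySem.List.pyRange (l - 1) (l - 1) (-1) = [] := PySem.List.pyRange_neg_one_eq_nil (by omega)
  simp [hB]

lemma peelB_eq_ring (t b l r : Int) (htb : t < b) (hlr : l < r) :
    peelB t b l r = segT t l (r + 1 - l).toNat ++ (segR t r (b - t).toNat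
      ++ (segB b r (r - l).toNat ++ (segL b l (b - 1 - t).toNat
      ++ peelB (t + 1) (b - 1) (l + 1) (r - 1)))) := by
  rw [peelB]
  rw [dif_pos ⟨by omega, by omega⟩, pieceT, pieceR, pieceB, pieceL, if_pos htb, if_pos hlr]
  simp [List.append_assoc]

lemma mem_peelB_aux : ∀ (n : Nat) (t b l r : Int) (p : Int × Int), (b + 1 - t).toNat ≤ n →
    (p ∈ peelB t b l r ↔ t ≤ p.1 ∧ p.1 ≤ b ∧ l ≤ p.2 ∧ p.2 ≤ r) := by
  intro n
  induction n with
  | zero =>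
    intro t b l r p hn
    rw [peelB_eq_nil _ _ _ _ (by omega)]
    simp; omega
  | succ n ih =>
    intro t b l r p hn
    by_cases h : t ≤ b ∧ l ≤ r
    · by_cases htb : t < b
      · by_cases hlr : l < r
        · rw [peelB_eq_ring t b l r htb hlr]
          simp only [List.mem_append, mem_segT, mem_segR, mem_segB, mem_segL,
            ih (t + 1) (b - 1) (l + 1) (r - 1) p (by omega)]
          omega
        · have hl : l = r := by omega
          subst hl
          rw [peelB_eq_col t b l htb]
          simp only [List.mem_append, mem_segT, mem_segR]
          omega
      · have ht : t = b := by omega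
        subst ht
        rw [peelB_eq_row t l r h.2]
        simp only [mem_segT]
        omega
    · rw [peelB_eq_nil _ _ _ _ h]; simp; omega

lemma mem_peelB (t b l r : Int) (p : Int × Int) :
    p ∈ peelB t b l r ↔ t ≤ p.1 ∧ p.1 ≤ b ∧ l ≤ p.2 ∧ p.2 ≤ r :=
  mem_peelB_aux (b + 1 - t).toNat t b l r p le_rfl

lemma nodup_segT (t l : Int) (k : Nat) : (segT t l k).Nodup :=
  List.nodup_range.map (fun a b h => by simp [Prod.ext_iff] at h; omega)

lemma nodup_segR (t r : Int) (k : Nat) : (segR t r k).Nodup :=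
  List.nodup_range.map (fun a b h => by simp [Prod.ext_iff] at h; omega)

lemma nodup_segB (b r : Int) (k : Nat) : (segB b r k).Nodup :=
  List.nodup_range.map (fun a b h => by simp [Prod.ext_iff] at h; omega)

lemma nodup_segL (b l : Int) (k : Nat) : (segL b l k).Nodup :=
  List.nodup_range.map (fun a b h => by simp [Prod.ext_iff] at h; omega)

lemma nodup_peelB_aux : ∀ (n : Nat) (t b l r : Int), (b + 1 - t).toNat ≤ n →
    (peelB t b l r).Nodup := by
  intro n
  induction n with
  | zero => intro t b l r hn; rw [peelB_eq_nil _ _ _ _ (by omega)]; simp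
  | succ n ih =>
    intro t b l r hn
    by_cases h : t ≤ b ∧ l ≤ r
    · by_cases htb : t < b
      · by_cases hlr : l < r
        · rw [peelB_eq_ring t b l r htb hlr]
          refine List.Nodup.append (nodup_segT _ _ _) ?_ ?_
          · refine List.Nodup.append (nodup_segR _ _ _) ?_ ?_
            · refine List.Nodup.append (nodup_segB _ _ _) ?_ ?_
              · refine List.Nodup.append (nodup_segL _ _ _)
                  (ih (t + 1) (b - 1) (l + 1) (r - 1) (by omega)) ?_
                intro p hp hq
                rw [mem_segL] at hp; rw [mem_peelB] at hq; omega
              · intro p hp hq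
                rw [mem_segB] at hp
                rcases List.mem_append.1 hq with hq | hq
                · rw [mem_segL] at hq; omega
                · rw [mem_peelB] at hq; omega
            · intro p hp hq
              rw [mem_segR] at hp
              rcases List.mem_append.1 hq with hq | hq
              · rw [mem_segB] at hq; omega
              · rcases List.mem_append.1 hq with hq | hq
                · rw [mem_segL] at hq; omega
                · rw [mem_peelB] at hq; omega
          · intro p hp hq
            rw [mem_segT] at hp
            rcases List.mem_append.1 hq with hq | hq
            · rw [mem_segR] at hq; omega
            · rcases List.mem_append.1 hq with hq | hq
              · rw [mem_segB] at hq; omega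
              · rcases List.mem_append.1 hq with hq | hq
                · rw [mem_segL] at hq; omega
                · rw [mem_peelB] at hq; omega
        · have hl : l = r := by omega
          subst hl
          rw [peelB_eq_col t b l htb]
          refine List.Nodup.append (nodup_segT _ _ _) (nodup_segR _ _ _) ?_
          intro p hp hq
          rw [mem_segT] at hp; rw [mem_segR] at hq; omega
      · have ht : t = b := by omega
        subst ht
        rw [peelB_eq_row t l r h.2]
        exact nodup_segT _ _ _
    · rw [peelB_eq_nil _ _ _ _ h]; simp

lemma nodup_peelB (t b l r : Int) : (peelB t b l r).Nodup :=
  nodup_peelB_aux (b + 1 - t).toNat t b l r le_rfl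

-- the flat grid, in closed form
lemma get_flat_grid_eq (w h : Int) :
    get_flat_grid w h = (PySem.List.pyRange 0 w 1).flatMap
      (fun row => (PySem.List.pyRange 0 h 1).map (fun col => (row, col))) := by
  unfold get_flat_grid
  simp only [PySem.List.foldl_append_singleton_eq_map]
  rw [PySem.List.foldl_append_eq_flatMap]
  simp

lemma mem_get_flat_grid (w h : Int) (p : Int × Int) :
    p ∈ get_flat_grid w h ↔ 0 ≤ p.1 ∧ p.1 < w ∧ 0 ≤ p.2 ∧ p.2 < h := by
  rw [get_flat_grid_eq]
  simp only [List.mem_flatMap, List.mem_map, PySem.List.mem_pyRange_one, Prod.ext_iff]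
  constructor
  · rintro ⟨row, ⟨h1, h2⟩, col, ⟨h3, h4⟩, h5, h6⟩; omega
  · rintro ⟨h1, h2, h3, h4⟩; exact ⟨p.1, ⟨by omega, by omega⟩, p.2, ⟨by omega, by omega⟩, rfl, rfl⟩

lemma nodup_get_flat_grid (w h : Int) : (get_flat_grid w h).Nodup := by
  rw [get_flat_grid_eq]
  refine List.nodup_flatMap.2 ⟨?_, ?_⟩
  · intro x _
    exact (PySem.List.nodup_pyRange_one _ _).map (fun a b hab => by simpa using hab)
  · refine (PySem.List.nodup_pyRange_one _ _).imp ?_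
    intro a b hab
    intro p hp hq
    simp at hp hq
    obtain ⟨c1, hc1, rfl⟩ := hp
    obtain ⟨c2, hc2, heq⟩ := hq
    simp [Prod.ext_iff] at heq
    exact hab heq.1.symm

lemma flat_perm_peel (w h : Int) :
    (get_flat_grid w h).Perm (peelB 0 (w - 1) 0 (h - 1)) := by
  refine (List.perm_ext_iff_of_nodup (nodup_get_flat_grid w h) (nodup_peelB _ _ _ _)).mpr ?_
  intro p
  rw [mem_get_flat_grid, mem_peelB]
  omega

-- loopA only looks at its set of remaining cells, never at their order
lemma loopA_perm : ∀ (fuel : Nat) (u1 u2 : List (Int × Int)) (cell op : Int × Int)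
    (acc : List (Int × Int)), u1.Perm u2 → loopA fuel u1 cell op acc = loopA fuel u2 cell op acc := by
  intro fuel
  induction fuel with
  | zero => intros; rfl
  | succ fuel ih =>
    intro u1 u2 cell op acc hp
    rw [loopA, loopA, hp.length_eq]
    by_cases hlen : 0 < u2.length
    · rw [if_pos hlen, if_pos hlen]
      by_cases hc : cell.1 < 0 ∨ cell.2 < 0 ∨ cell ∉ u1
      · rw [if_pos hc, if_pos (by rwa [hp.mem_iff] at hc)]
        exact ih _ _ _ _ _ hp
      · rw [if_neg hc, if_neg (by rwa [hp.mem_iff] at hc)]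
        exact ih _ _ _ _ _ (hp.erase cell)
    · rw [if_neg hlen, if_neg hlen]

@[simp] lemma loopA_nil (fuel : Nat) (cell op : Int × Int) (acc : List (Int × Int)) :
    loopA fuel [] cell op acc = acc := by
  cases fuel <;> simp [loopA]

-- a straight segment the walker can consume: consecutive cells differ by op, all coords ≥ 0
inductive IsSeg : (Int × Int) → (Int × Int) → List (Int × Int) → Prop
  | nil (op cell : Int × Int) : IsSeg op cell []
  | cons (op cell : Int × Int) (tl : List (Int × Int)) :
      0 ≤ cell.1 → 0 ≤ cell.2 →
      IsSeg op (cell.1 + op.1, cell.2 + op.2) tl → IsSeg op cell (cell :: tl)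

lemma isSeg_range (op : Int × Int) : ∀ (k : Nat) (p : Int × Int),
    (∀ i : Nat, i < k → 0 ≤ p.1 + i * op.1 ∧ 0 ≤ p.2 + i * op.2) →
    IsSeg op p ((List.range k).map (fun (i : Nat) => (p.1 + (i : Int) * op.1, p.2 + (i : Int) * op.2))) := by
  intro k
  induction k with
  | zero => intro p _; simpa using IsSeg.nil op p
  | succ k ih =>
    intro p h
    rw [List.range_succ_eq_map, List.map_cons, List.map_map]
    have h0 := h 0 (by omega)
    have he : (p.1 + ((0 : Nat) : Int) * op.1, p.2 + ((0 : Nat) : Int) * op.2) = p := by simp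
    rw [he]
    refine IsSeg.cons op p _ (by simpa using h0.1) (by simpa using h0.2) ?_
    have hc : ((fun (i : Nat) => (p.1 + (i : Int) * op.1, p.2 + (i : Int) * op.2)) ∘ Nat.succ)
        = fun (i : Nat) => ((p.1 + op.1) + (i : Int) * op.1, (p.2 + op.2) + (i : Int) * op.2) := by
      funext i; simp [Function.comp]; constructor <;> push_cast <;> ring
    rw [hc]
    exact ih (p.1 + op.1, p.2 + op.2) (fun i hi => by
      have hstep := h (i + 1) (by omega)
      push_cast at hstep ⊢
      constructor <;> [linarith [hstep.1]; linarith [hstep.2]])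

lemma isSeg_segT (t l : Int) (k : Nat) (ht : 0 ≤ t) (hl : 0 ≤ l) : IsSeg (0, 1) (t, l) (segT t l k) := by
  have hs := isSeg_range (0, 1) k (t, l) (fun i hi => by constructor <;> simp <;> omega)
  simpa [segT] using hs

lemma isSeg_segR (t r : Int) (k : Nat) (ht : 0 ≤ t + 1) (hr : 0 ≤ r) :
    IsSeg (1, 0) (t + 1, r) (segR t r k) := by
  have hs := isSeg_range (1, 0) k (t + 1, r) (fun i hi => by constructor <;> simp <;> omega)
  have he : ((List.range k).map (fun (i : Nat) =>
      ((t + 1, r).1 + (i : Int) * (1, 0).1, (t + 1, r).2 + (i : Int) * (1, 0).2))) = segR t r k := by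
    apply List.map_congr_left; intro i _; simp
  rwa [he] at hs

lemma isSeg_segB (b r : Int) (k : Nat) (hb : 0 ≤ b) (hr : 0 ≤ r - k) :
    IsSeg (0, -1) (b, r - 1) (segB b r k) := by
  have hs := isSeg_range (0, -1) k (b, r - 1) (fun i hi => by constructor <;> simp <;> omega)
  have he : ((List.range k).map (fun (i : Nat) =>
      ((b, r - 1).1 + (i : Int) * (0, -1).1, (b, r - 1).2 + (i : Int) * (0, -1).2))) = segB b r k := by
    apply List.map_congr_left; intro i _; simp; ring
  rwa [he] at hs

lemma isSeg_segL (b l : Int) (k : Nat) (hl : 0 ≤ l) (hb : 0 ≤ b - k) :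
    IsSeg (-1, 0) (b - 1, l) (segL b l k) := by
  have hs := isSeg_range (-1, 0) k (b - 1, l) (fun i hi => by constructor <;> simp <;> omega)
  have he : ((List.range k).map (fun (i : Nat) =>
      ((b - 1, l).1 + (i : Int) * (-1, 0).1, (b - 1, l).2 + (i : Int) * (-1, 0).2))) = segL b l k := by
    apply List.map_congr_left; intro i _; simp; ring
  rwa [he] at hs

lemma walk_seg {op cell : Int × Int} {cells : List (Int × Int)} (hseg : IsSeg op cell cells) :
    ∀ (k fuel : Nat) (rest acc : List (Int × Int)), cells.length = k →
    loopA (k + fuel) (cells ++ rest) cell op acc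
      = loopA fuel rest (cell.1 + k * op.1, cell.2 + k * op.2) op (acc ++ cells) := by
  induction hseg with
  | nil cell => intro k fuel rest acc hk; simp at hk; subst hk; simp
  | cons cell tl h1 h2 hseg ih =>
    intro k fuel rest acc hk
    simp at hk
    subst hk
    rw [show tl.length + 1 + fuel = (tl.length + fuel) + 1 from by omega, loopA]
    rw [if_pos (by simp), if_neg (by push_neg; exact ⟨h1, h2, List.mem_cons_self⟩)]
    rw [show (cell :: tl ++ rest).erase cell = tl ++ rest from List.erase_cons_head ..]
    rw [ih tl.length fuel rest (acc ++ [cell]) rfl]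
    congr 1
    · rw [Prod.mk.injEq]; push_cast; constructor <;> ring
    · simp

lemma walk_turn {ung : List (Int × Int)} {cell : Int × Int} (op : Int × Int) (fuel : Nat)
    (acc : List (Int × Int)) (h1 : ung ≠ [])
    (h2 : cell.1 < 0 ∨ cell.2 < 0 ∨ cell ∉ ung) :
    loopA (1 + fuel) ung cell op acc
      = loopA fuel ung (cell.1 - op.1 + (nextOpA op).1, cell.2 - op.2 + (nextOpA op).2) (nextOpA op) acc := by
  rw [show 1 + fuel = fuel + 1 from by omega, loopA,
    if_pos (by simpa [List.length_pos_iff] using h1), if_pos h2]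

@[simp] lemma nextOpA_r : nextOpA (0, 1) = (1, 0) := by decide
@[simp] lemma nextOpA_d : nextOpA (1, 0) = (0, -1) := by decide
@[simp] lemma nextOpA_l : nextOpA (0, -1) = (-1, 0) := by decide
@[simp] lemma nextOpA_u : nextOpA (-1, 0) = (0, 1) := by decide

lemma walk_spiral : ∀ (n : Nat) (t b l r : Int) (fuel : Nat) (acc : List (Int × Int)),
    (b + 1 - t).toNat ≤ n → 0 ≤ t → 0 ≤ l →
    5 * (peelB t b l r).length ≤ fuel →
    loopA fuel (peelB t b l r) (t, l) (0, 1) acc = acc ++ peelB t b l r := by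
  intro n
  induction n with
  | zero =>
    intro t b l r fuel acc hn ht hl _
    rw [peelB_eq_nil _ _ _ _ (by omega)]; simp
  | succ n ih =>
    intro t b l r fuel acc hn ht hl hf
    by_cases hok : t ≤ b ∧ l ≤ r
    case neg => rw [peelB_eq_nil _ _ _ _ hok]; simp
    case pos =>
    obtain ⟨htb', hlr'⟩ := hok
    by_cases htb : t < b
    case neg =>
      -- single-row ring: t = b, only the top segment, then the list is empty
      have ht2 : t = b := by omega
      subst ht2
      rw [peelB_eq_row t l r hlr'] at hf ⊢
      obtain ⟨f', rfl⟩ : ∃ f', fuel = (r + 1 - l).toNat + f' :=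
        ⟨fuel - (r + 1 - l).toNat, by simp at hf; omega⟩
      have hw := walk_seg (isSeg_segT t l (r + 1 - l).toNat ht hl)
        (r + 1 - l).toNat f' [] acc (by simp)
      rw [List.append_nil] at hw
      rw [hw, loopA_nil]
    case pos =>
    by_cases hlr : l < r
    case neg =>
      -- single-column ring: l = r, top cell then right column, then empty
      have hl2 : l = r := by omega
      subst hl2
      rw [peelB_eq_col t b l htb] at hf ⊢
      obtain ⟨f', rfl⟩ : ∃ f', fuel = 1 + (1 + ((b - t).toNat + f')) :=
        ⟨fuel - (2 + (b - t).toNat), by simp at hf; omega⟩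
      rw [walk_seg (isSeg_segT t l 1 ht hl) 1 (1 + ((b - t).toNat + f')) (segR t l (b - t).toNat) acc (by simp)]
      rw [show ((t, l).1 + ((1 : Nat) : Int) * (0, 1).1, (t, l).2 + ((1 : Nat) : Int) * (0, 1).2)
          = (t, l + 1) from by simp [Prod.ext_iff]; try omega]
      rw [walk_turn (0, 1) ((b - t).toNat + f') _
        (List.ne_nil_of_length_pos (by simp; omega))
        (Or.inr (Or.inr (by rw [mem_segR]; simp; try omega)))]
      simp only [nextOpA_r]
      rw [show ((t, l + 1).1 - (0 : Int) + (1 : Int), (t, l + 1).2 - (1 : Int) + (0 : Int))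
          = (t + 1, l) from by simp [Prod.ext_iff]; try constructor <;> ring]
      have hw := walk_seg (isSeg_segR t l (b - t).toNat (by omega) (by omega))
        (b - t).toNat f' [] (acc ++ segT t l 1) (by simp)
      rw [List.append_nil] at hw
      rw [hw, loopA_nil, List.append_assoc]
    case pos =>
      -- full ring
      rw [peelB_eq_ring t b l r htb hlr] at hf ⊢
      have hkT : (1 : Nat) ≤ (r + 1 - l).toNat := by omega
      have hkR : (1 : Nat) ≤ (b - t).toNat := by omega
      have hkB : (1 : Nat) ≤ (r - l).toNat := by omega
      -- walk the top segment
      have lenfact : 5 * ((r + 1 - l).toNat + ((b - t).toNat + ((r - l).toNat + ((b - 1 - t).toNat +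
          (peelB (t + 1) (b - 1) (l + 1) (r - 1)).length)))) ≤ fuel := by
        simpa using hf
      obtain ⟨f', hfuel, hf'⟩ : ∃ f', fuel = (r + 1 - l).toNat + (1 + ((b - t).toNat + (1 + ((r - l).toNat + f'))))
          ∧ (b - 1 - t).toNat + 1 + (peelB (t + 1) (b - 1) (l + 1) (r - 1)).length * 5 + 1 ≤ f' + 1 := by
        refine ⟨fuel - ((r + 1 - l).toNat + 1 + (b - t).toNat + 1 + (r - l).toNat), by omega, by omega⟩
      subst hfuel
      rw [walk_seg (isSeg_segT t l (r + 1 - l).toNat ht hl) (r + 1 - l).toNat _ _ acc (by simp)]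
      rw [show ((t, l).1 + (((r + 1 - l).toNat : Nat) : Int) * (0, 1).1,
          (t, l).2 + (((r + 1 - l).toNat : Nat) : Int) * (0, 1).2) = (t, r + 1) from
        by simp [Prod.ext_iff]; try omega]
      -- turn 1 at (t, r+1)
      rw [walk_turn (0, 1) _ _
        (by apply List.ne_nil_of_length_pos; simp; omega)
        (Or.inr (Or.inr (by
          simp only [List.mem_append, mem_segR, mem_segB, mem_segL, mem_peelB]
          simp; try omega)))]
      simp only [nextOpA_r]
      rw [show ((t, r + 1).1 - (0 : Int) + (1 : Int), (t, r + 1).2 - (1 : Int) + (0 : Int))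
          = (t + 1, r) from by simp [Prod.ext_iff]; try constructor <;> ring]
      -- walk the right segment
      rw [walk_seg (isSeg_segR t r (b - t).toNat (by omega) (by omega)) (b - t).toNat _ _ _ (by simp)]
      rw [show ((t + 1, r).1 + (((b - t).toNat : Nat) : Int) * (1, 0).1,
          (t + 1, r).2 + (((b - t).toNat : Nat) : Int) * (1, 0).2) = (b + 1, r) from
        by simp [Prod.ext_iff]; try omega]
      -- turn 2 at (b+1, r)
      rw [walk_turn (1, 0) _ _
        (by apply List.ne_nil_of_length_pos; simp; omega)
        (Or.inr (Or.inr (by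
          simp only [List.mem_append, mem_segB, mem_segL, mem_peelB]
          simp; try omega)))]
      simp only [nextOpA_d]
      rw [show ((b + 1, r).1 - (1 : Int) + (0 : Int), (b + 1, r).2 - (0 : Int) + (-1 : Int))
          = (b, r - 1) from by simp [Prod.ext_iff]; try constructor <;> ring]
      -- walk the bottom segment
      rw [walk_seg (isSeg_segB b r (r - l).toNat (by omega) (by omega)) (r - l).toNat _ _ _ (by simp)]
      rw [show ((b, r - 1).1 + (((r - l).toNat : Nat) : Int) * (0, -1).1,
          (b, r - 1).2 + (((r - l).toNat : Nat) : Int) * (0, -1).2) = (b, l - 1) from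
        by simp [Prod.ext_iff]; try omega]
      -- now at (b, l-1) with the left segment and the inner spiral remaining
      by_cases hrest : b = t + 1
      · -- left segment and inner rectangle are both empty: the walker stops here
        have hL : segL b l (b - 1 - t).toNat = [] := by
          have : (b - 1 - t).toNat = 0 := by omega
          simp [this, segL]
        have hI : peelB (t + 1) (b - 1) (l + 1) (r - 1) = [] :=
          peelB_eq_nil _ _ _ _ (by omega)
        rw [hL, hI]
        simp [List.append_assoc]
      · -- left segment is nonempty; turn 3 at (b, l-1)
        have hkL : (1 : Nat) ≤ (b - 1 - t).toNat := by omega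
        obtain ⟨f'', hfuel2, hf''⟩ : ∃ f'', f' = 1 + ((b - 1 - t).toNat + f'')
            ∧ 5 * (peelB (t + 1) (b - 1) (l + 1) (r - 1)).length + 1 ≤ f'' + 1 := by
          refine ⟨f' - (1 + (b - 1 - t).toNat), by omega, by omega⟩
        subst hfuel2
        rw [walk_turn (0, -1) _ _
          (by apply List.ne_nil_of_length_pos; simp; omega)
          (Or.inr (Or.inr (by
            simp only [List.mem_append, mem_segL, mem_peelB]
            simp; try omega)))]
        simp only [nextOpA_l]
        rw [show ((b, l - 1).1 - (0 : Int) + (-1 : Int), (b, l - 1).2 - (-1 : Int) + (0 : Int))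
            = (b - 1, l) from by simp [Prod.ext_iff]; try constructor <;> ring]
        -- walk the left segment
        rw [walk_seg (isSeg_segL b l (b - 1 - t).toNat hl (by omega)) (b - 1 - t).toNat _ _ _ (by simp)]
        rw [show ((b - 1, l).1 + (((b - 1 - t).toNat : Nat) : Int) * (-1, 0).1,
            (b - 1, l).2 + (((b - 1 - t).toNat : Nat) : Int) * (-1, 0).2) = (t, l) from
          by simp [Prod.ext_iff]; try omega]
        by_cases hinner : t + 1 ≤ b - 1 ∧ l + 1 ≤ r - 1
        · -- turn 4 at (t, l), then recurse on the inner rectangle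
          have hne : peelB (t + 1) (b - 1) (l + 1) (r - 1) ≠ [] := by
            intro hempty
            have := (mem_peelB (t + 1) (b - 1) (l + 1) (r - 1) (t + 1, l + 1)).2 (by simp; omega)
            rw [hempty] at this
            simp at this
          obtain ⟨f''', hfuel3⟩ : ∃ f''', f'' = 1 + f''' := ⟨f'' - 1, by omega⟩
          subst hfuel3
          rw [walk_turn (-1, 0) _ _ hne
            (Or.inr (Or.inr (by rw [mem_peelB]; simp; try omega)))]
          simp only [nextOpA_u]
          rw [show ((t, l).1 - (-1 : Int) + (0 : Int), (t, l).2 - (0 : Int) + (1 : Int))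
              = (t + 1, l + 1) from by simp [Prod.ext_iff]; try constructor <;> ring]
          rw [ih (t + 1) (b - 1) (l + 1) (r - 1) f''' _ (by omega) (by omega) (by omega) (by omega)]
          simp [List.append_assoc]
        · -- inner rectangle empty: nothing remains
          have hI : peelB (t + 1) (b - 1) (l + 1) (r - 1) = [] := peelB_eq_nil _ _ _ _ hinner
          rw [hI]
          simp [List.append_assoc]

-- ===== VERDICT (by name: the statement is the Claim_ definition above) =====
theorem snake_grid_spec : Claim_equal_snake_grid := by
  intro w h _
  show snake_grid w h = snake_grid_alt w h
  unfold snake_grid snake_grid_alt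
  rw [loopA_perm _ _ _ _ _ _ (flat_perm_peel w h),
    (flat_perm_peel w h).length_eq]
  rw [walk_spiral (w - 1 + 1 - 0).toNat 0 (w - 1) 0 (h - 1)
    (5 * (peelB 0 (w - 1) 0 (h - 1)).length + 5) [] le_rfl le_rfl le_rfl (by omega)]
  exact List.nil_append _
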